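-- pv_equiv track=rewrite | github.com/purbid/ValueAlignmentVerification | data/annotate.py | _colourSpans
-- ===== SOURCE A (Python) =====
-- def _colourSpans(annotationSpans, goldSpans):
--     yellow, red, green = [], [], []
--     annotationSpans.sort()
--     goldSpans.sort()
--     for aInd in range(len(annotationSpans)):
--         lastGreen = annotationSpans[aInd][0]
--         for gInd in range(len(goldSpans)):
--             #If the gold span end before/at the start of the current annotated span, there would be no overlap with this gold span
--             if goldSpans[gInd][1] <= annotationSpans[aInd][0]:
--                 continue
--             #If the gold span starts after the current annotated span ends, there would be no overlap with this gold span or any successive gold span (gold spans are sorted)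
--             if goldSpans[gInd][0] > annotationSpans[aInd][1]:
--                 break
--             #If the gold span starts after the last green span on the current annotated span => The span starting from where the last green span ended until where the current gold span starts is to be marked red
--             if goldSpans[gInd][0] > lastGreen:
--                 red.append((lastGreen, goldSpans[gInd][0]))
--             green.append((max(goldSpans[gInd][0], lastGreen), min(goldSpans[gInd][1], annotationSpans[aInd][1])))
--             lastGreen = min(goldSpans[gInd][1], annotationSpans[aInd][1])
--         if lastGreen < annotationSpans[aInd][1]:
--             red.append((lastGreen, annotationSpans[aInd][1]))
--     for gInd in range(len(goldSpans)):
--         lastGreen = goldSpans[gInd][0]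
--         for greenInd in range(len(green)):
--             #If the green span ends before the current gold span starts, there would be no overlap with this green span
--             if green[greenInd][1] <= goldSpans[gInd][0]:
--                 continue
--             #If the green span starts after the current gold span ends, there would be no overlap with this green span or any successive green span (green spans are sorted)
--             if green[greenInd][0] > goldSpans[gInd][1]:
--                 break
--             #If the green span starts after the start of the current gold span, the span starting from where the last green span ended to where this green span starts should be marked in yellow
--             if green[greenInd][0] > goldSpans[gInd][0]:
--                 yellow.append((lastGreen, min(goldSpans[gInd][1], green[greenInd][0])))
--             lastGreen = green[greenInd][1]
--         if lastGreen < goldSpans[gInd][1]: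
--             yellow.append((lastGreen, goldSpans[gInd][1]))
--     colouredSpans = []
--     for y in yellow:
--         colouredSpans.append((y[0], y[1], "magenta"))
--     for g in green:
--         colouredSpans.append((g[0], g[1], "green"))
--     for r in red:
--         colouredSpans.append((r[0], r[1], "red"))
--     colouredSpans.sort()
--     return colouredSpans
-- ===== SOURCE B (Python) =====
-- # Two-pointer sweep: each phase keeps a monotone pointer `lo` into the sorted
-- # cover list (covers ending at/before the current base start are dead for every
-- # later base too, since base starts ascend), so the scan resumes there instead
-- # of rescanning from index 0; colours are attached at emission time.
-- # Note: like A, this sorts both argument lists in place.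
-- def _colourSpans(annotationSpans, goldSpans):
--     annotationSpans.sort()
--     goldSpans.sort()
--     green, reds, yellows = [], [], []
--     lo, n = 0, len(goldSpans)
--     for s, e in annotationSpans:
--         while lo < n and goldSpans[lo][1] <= s:
--             lo += 1                      # permanently dead cover
--         cur, j = s, lo
--         while j < n:
--             cs, ce = goldSpans[j]
--             if cs > e and ce > s:        # first live cover past the base: stop
--                 break
--             if ce > s:                   # live cover overlapping the base
--                 if cs > cur:
--                     reds.append((cur, cs, "red"))
--                 green.append((max(cs, cur), min(ce, e)))
--                 cur = min(ce, e)
--             j += 1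
--         if cur < e:
--             reds.append((cur, e, "red"))
--     lo, m = 0, len(green)
--     for s, e in goldSpans:
--         while lo < m and green[lo][1] <= s:
--             lo += 1
--         cur, j = s, lo
--         while j < m:
--             cs, ce = green[j]
--             if cs > e and ce > s:
--                 break
--             if ce > s:
--                 if cs > s:
--                     yellows.append((cur, min(e, cs), "magenta"))
--                 cur = ce
--             j += 1
--         if cur < e:
--             yellows.append((cur, e, "magenta"))
--     return sorted(yellows + [(a, b, "green") for a, b in green] + reds)
-- ===== Notes on version B (the rewrite author's own statement) =====
-- stated objective: alternative
-- what changed: Replaces A's nested scans that restart every inner pass at index 0 by a two-pointer sweep: each phase keeps a monotone lower pointer into the sorted cover list (covers ending at or before the current base start are permanently dead since base starts ascend), the inner loop has a single exit test instead of continue/break, and colours are attached at emission instead of in separate mapping passes.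
import Mathlib
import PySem

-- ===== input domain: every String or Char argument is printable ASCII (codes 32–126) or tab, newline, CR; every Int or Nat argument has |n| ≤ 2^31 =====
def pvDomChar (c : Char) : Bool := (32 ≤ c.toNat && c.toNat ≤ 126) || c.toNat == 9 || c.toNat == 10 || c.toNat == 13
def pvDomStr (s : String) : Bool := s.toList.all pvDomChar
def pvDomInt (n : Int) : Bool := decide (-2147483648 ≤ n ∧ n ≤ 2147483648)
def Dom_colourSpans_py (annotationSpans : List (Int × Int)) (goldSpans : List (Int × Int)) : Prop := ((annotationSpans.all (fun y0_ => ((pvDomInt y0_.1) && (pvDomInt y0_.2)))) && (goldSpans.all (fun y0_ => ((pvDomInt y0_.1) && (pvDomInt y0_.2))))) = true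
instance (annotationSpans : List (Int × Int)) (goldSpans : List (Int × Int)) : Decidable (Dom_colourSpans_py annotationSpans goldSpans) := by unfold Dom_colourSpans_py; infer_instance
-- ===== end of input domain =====

-- B replaces A's restart-from-index-0 nested scans by a two-pointer sweep with a
-- monotone lower pointer per phase and colours attached at emission; the
-- equivalence proved is about the RETURN value only: A sorts both argument lists
-- in place (B performs the same in-place sort; Lean lists are immutable).

-- Shared sort primitives (both Pythons call list.sort()/sorted()):
-- Python's sort on (int, int) pairs is sorted with the lexicographic tuple key.
-- Python's sort on (int, int, str) triples is hand-ported (PySem.sorted2 covers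
-- only 2-tuples): `pyLt3` is exactly Python's tuple comparison — lexicographic,
-- with Python's `str <` being code-point lexicographic, which is Lean's String
-- `<` (exact on the ASCII strings occurring here); the insertion sort itself is
-- the same stable foldl/insertBy loop PySem.List.sorted is defined by
-- (PySem.List.sorted_eq_foldl_insertBy).
def pyLt3 (a b : Int × Int × String) : Bool :=
  a.1 < b.1 || (a.1 == b.1 && (a.2.1 < b.2.1 || (a.2.1 == b.2.1 && decide (a.2.2 < b.2.2))))

def pySort3 (l : List (Int × Int × String)) : List (Int × Int × String) :=
  l.foldl (fun acc x => PySem.List.insertBy pyLt3 x acc) []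

-- ===== PORT A =====
-- inner loop of A's first phase: walks goldSpans with continue/break, threading
-- (lastGreen, green, red); the `break` is the early return.
def pyA1 (a : Int × Int) (golds : List (Int × Int)) (lastGreen : Int)
    (green red : List (Int × Int)) : Int × List (Int × Int) × List (Int × Int) :=
  match golds with
  | [] => (lastGreen, green, red)
  | g :: rest =>
    if g.2 ≤ a.1 then pyA1 a rest lastGreen green red
    else if g.1 > a.2 then (lastGreen, green, red)
    else
      let red' := if g.1 > lastGreen then red ++ [(lastGreen, g.1)] else red
      let green' := green ++ [(max g.1 lastGreen, min g.2 a.2)]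
      pyA1 a rest (min g.2 a.2) green' red'

-- inner loop of A's second phase: walks green with continue/break, threading
-- (lastGreen, yellow).
def pyA2 (g : Int × Int) (greens : List (Int × Int)) (lastGreen : Int)
    (yellow : List (Int × Int)) : Int × List (Int × Int) :=
  match greens with
  | [] => (lastGreen, yellow)
  | c :: rest =>
    if c.2 ≤ g.1 then pyA2 g rest lastGreen yellow
    else if c.1 > g.2 then (lastGreen, yellow)
    else
      let yellow' := if c.1 > g.1 then yellow ++ [(lastGreen, min g.2 c.1)] else yellow
      pyA2 g rest c.2 yellow'

def colourSpans_py (annotationSpans : List (Int × Int)) (goldSpans : List (Int × Int)) : List (Int × Int × String) :=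
  let aS := PySem.List.sorted2 annotationSpans (·.1) (·.2)
  let gS := PySem.List.sorted2 goldSpans (·.1) (·.2)
  let gr := aS.foldl (fun (st : List (Int × Int) × List (Int × Int)) a =>
      let r := pyA1 a gS a.1 st.1 st.2
      (r.2.1, if r.1 < a.2 then r.2.2 ++ [(r.1, a.2)] else r.2.2)) ([], [])
  let green := gr.1
  let red := gr.2
  let yellow := gS.foldl (fun (st : List (Int × Int)) g =>
      let r := pyA2 g green g.1 st
      if r.1 < g.2 then r.2 ++ [(r.1, g.2)] else r.2) []
  let coloured := yellow.map (fun y => (y.1, y.2, "magenta"))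
      ++ green.map (fun c => (c.1, c.2, "green"))
      ++ red.map (fun r => (r.1, r.2, "red"))
  pySort3 coloured

-- ===== PORT B =====
-- Source B keeps an integer pointer `lo` into the fixed sorted cover list; the port
-- represents that pointer by the suffix it points at (threaded through the fold):
-- the same traversal, advanced by the same `while … lo += 1` skip loop.
def skipDead (s : Int) : List (Int × Int) → List (Int × Int)
  | [] => []
  | c :: t => if c.2 ≤ s then skipDead s t else c :: t

-- Source B phase-1 inner `while j < n` loop (single exit test `cs > e and ce > s`)
def scanB1 (s e : Int) (covers : List (Int × Int)) (cur : Int)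
    (green : List (Int × Int)) (reds : List (Int × Int × String)) :
    Int × List (Int × Int) × List (Int × Int × String) :=
  match covers with
  | [] => (cur, green, reds)
  | c :: t =>
    if c.1 > e ∧ c.2 > s then (cur, green, reds)
    else if c.2 > s then
      scanB1 s e t (min c.2 e) (green ++ [(max c.1 cur, min c.2 e)])
        (if c.1 > cur then reds ++ [(cur, c.1, "red")] else reds)
    else scanB1 s e t cur green reds

-- Source B phase-2 inner `while j < m` loop
def scanB2 (s e : Int) (covers : List (Int × Int)) (cur : Int)
    (yellows : List (Int × Int × String)) : Int × List (Int × Int × String) :=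
  match covers with
  | [] => (cur, yellows)
  | c :: t =>
    if c.1 > e ∧ c.2 > s then (cur, yellows)
    else if c.2 > s then
      scanB2 s e t c.2 (if c.1 > s then yellows ++ [(cur, min e c.1, "magenta")] else yellows)
    else scanB2 s e t cur yellows

def colourSpans_py_alt (annotationSpans : List (Int × Int)) (goldSpans : List (Int × Int)) : List (Int × Int × String) :=
  let aS := PySem.List.sorted2 annotationSpans (·.1) (·.2)
  let gS := PySem.List.sorted2 goldSpans (·.1) (·.2)
  let p1 := aS.foldl (fun (st : List (Int × Int) × List (Int × Int) × List (Int × Int × String)) a =>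
      let rest := skipDead a.1 st.1
      let r := scanB1 a.1 a.2 rest a.1 st.2.1 st.2.2
      (rest, r.2.1, if r.1 < a.2 then r.2.2 ++ [(r.1, a.2, "red")] else r.2.2)) (gS, [], [])
  let green := p1.2.1
  let reds := p1.2.2
  let yellows := (gS.foldl (fun (st : List (Int × Int) × List (Int × Int × String)) g =>
      let rest := skipDead g.1 st.1
      let r := scanB2 g.1 g.2 rest g.1 st.2
      (rest, if r.1 < g.2 then r.2 ++ [(r.1, g.2, "magenta")] else r.2)) (green, [])).2
  pySort3 (yellows ++ green.map (fun c => (c.1, c.2, "green")) ++ reds)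

-- ===== PRECONDITION & SPEC =====
def Spec_colourSpans_py (annotationSpans : List (Int × Int)) (goldSpans : List (Int × Int)) (out : List (Int × Int × String)) : Prop := out = colourSpans_py_alt annotationSpans goldSpans
instance (annotationSpans : List (Int × Int)) (goldSpans : List (Int × Int)) (out : List (Int × Int × String)) : Decidable (Spec_colourSpans_py annotationSpans goldSpans out) := by unfold Spec_colourSpans_py; infer_instance

-- ===== CLAIM (what is proved, stated in full; the proofs are below) =====
def Claim_equal_colourSpans_py : Prop := ∀ (annotationSpans : List (Int × Int)) (goldSpans : List (Int × Int)), Dom_colourSpans_py annotationSpans goldSpans → Spec_colourSpans_py annotationSpans goldSpans (colourSpans_py annotationSpans goldSpans)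

-- ===== LEMMAS AND PROOFS =====

-- sortedness of the outer lists: the foldl/insertBy insertion sort of sorted2
-- yields a list pairwise-ordered by the non-strict induced order.
theorem insertBy_pairwise {α : Type} (before : α → α → Bool)
    (hasym : ∀ a b, before a b = true → before b a = false)
    (htrans : ∀ a b c, before b a = false → before c b = false → before c a = false)
    (x : α) :
    ∀ (l : List α), l.Pairwise (fun a b => before b a = false) →
      (PySem.List.insertBy before x l).Pairwise (fun a b => before b a = false) := by
  intro l
  induction l with
  | nil => intro _; simp [PySem.List.insertBy]
  | cons y ys ih =>
    intro h
    rw [List.pairwise_cons] at h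
    obtain ⟨hy, hys⟩ := h
    by_cases hb : before x y = true
    · simp only [PySem.List.insertBy, hb, if_true]
      refine List.Pairwise.cons ?_ (List.Pairwise.cons hy hys)
      intro z hz
      rcases List.mem_cons.mp hz with rfl | hz
      · exact hasym x z hb
      · exact htrans x y z (hasym x y hb) (hy z hz)
    · simp only [PySem.List.insertBy, hb]
      refine List.Pairwise.cons ?_ (ih hys)
      intro z hz
      rcases (PySem.List.mem_insertBy before x z ys).mp hz with rfl | hz
      · exact Bool.eq_false_iff.mpr (fun hc => hb hc)
      · exact hy z hz

theorem foldl_insertBy_pairwise {α : Type} (before : α → α → Bool)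
    (hasym : ∀ a b, before a b = true → before b a = false)
    (htrans : ∀ a b c, before b a = false → before c b = false → before c a = false) :
    ∀ (xs acc : List α), acc.Pairwise (fun a b => before b a = false) →
      (xs.foldl (fun acc x => PySem.List.insertBy before x acc) acc).Pairwise
        (fun a b => before b a = false) := by
  intro xs
  induction xs with
  | nil => intro acc h; exact h
  | cons x t ih =>
    intro acc h
    exact ih _ (insertBy_pairwise before hasym htrans x acc h)

theorem sorted2_pairwise_fst (xs : List (Int × Int)) :
    (PySem.List.sorted2 xs (·.1) (·.2)).Pairwise (fun a b => a.1 ≤ b.1) := by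
  have h := foldl_insertBy_pairwise
      (fun a b : Int × Int => decide (a.1 < b.1) || (!decide (b.1 < a.1) && decide (a.2 < b.2)))
      (by intro a b hab; revert hab; simp; omega)
      (by intro a b c hba hcb; revert hba hcb; simp; omega)
      xs [] (by simp)
  refine List.Pairwise.imp ?_ h
  intro a b hba
  revert hba; simp; omega

-- A's continue branch ignores covers that end at/before the base start, so a
-- prefix of such covers can be dropped without changing the scan.
theorem pyA1_dead_prefix (a : Int × Int) :
    ∀ (pre l : List (Int × Int)) (c : Int) (g r : List (Int × Int)),
      (∀ x ∈ pre, x.2 ≤ a.1) → pyA1 a (pre ++ l) c g r = pyA1 a l c g r := by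
  intro pre
  induction pre with
  | nil => intro l c g r _; rfl
  | cons x t ih =>
    intro l c g r h
    have hx : x.2 ≤ a.1 := h x (List.mem_cons_self)
    rw [List.cons_append, show pyA1 a (x :: (t ++ l)) c g r = pyA1 a (t ++ l) c g r by
      simp [pyA1, hx]]
    exact ih l c g r (fun y hy => h y (List.mem_cons_of_mem x hy))

theorem pyA2_dead_prefix (g : Int × Int) :
    ∀ (pre l : List (Int × Int)) (c : Int) (y : List (Int × Int)),
      (∀ x ∈ pre, x.2 ≤ g.1) → pyA2 g (pre ++ l) c y = pyA2 g l c y := by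
  intro pre
  induction pre with
  | nil => intro l c y _; rfl
  | cons x t ih =>
    intro l c y h
    have hx : x.2 ≤ g.1 := h x (List.mem_cons_self)
    rw [List.cons_append, show pyA2 g (x :: (t ++ l)) c y = pyA2 g (t ++ l) c y by
      simp [pyA2, hx]]
    exact ih l c y (fun z hz => h z (List.mem_cons_of_mem x hz))

-- Source B's `while lo < n and covers[lo][1] <= s: lo += 1` removes exactly a prefix
-- of covers that A's continue branch skips.
theorem skipDead_decomp (s : Int) :
    ∀ (l : List (Int × Int)), ∃ pre, l = pre ++ skipDead s l ∧ ∀ x ∈ pre, x.2 ≤ s := by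
  intro l
  induction l with
  | nil => exact ⟨[], rfl, by simp⟩
  | cons c t ih =>
    by_cases hc : c.2 ≤ s
    · obtain ⟨pre, hpre, hall⟩ := ih
      refine ⟨c :: pre, ?_, ?_⟩
      · simp only [skipDead, hc, if_true, List.cons_append]
        exact congrArg (c :: ·) hpre
      · intro x hx
        rcases List.mem_cons.mp hx with rfl | hx
        · exact hc
        · exact hall x hx
    · exact ⟨[], by simp [skipDead, hc], by simp⟩

-- Source B's single-exit `while` loop computes exactly A's continue/break scan,
-- with the red pairs already coloured.
theorem scanB1_eq (a : Int × Int) :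
    ∀ (l : List (Int × Int)) (c : Int) (g r : List (Int × Int)),
      scanB1 a.1 a.2 l c g (r.map (fun x => (x.1, x.2, "red"))) =
        ((pyA1 a l c g r).1, (pyA1 a l c g r).2.1,
          (pyA1 a l c g r).2.2.map (fun x => (x.1, x.2, "red"))) := by
  intro l
  induction l with
  | nil => intro c g r; rfl
  | cons x t ih =>
    intro c g r
    by_cases h1 : x.2 ≤ a.1
    · have hB : ¬ (x.1 > a.2 ∧ x.2 > a.1) := by omega
      have h2 : ¬ x.2 > a.1 := by omega
      rw [show scanB1 a.1 a.2 (x :: t) c g (r.map (fun x => (x.1, x.2, "red"))) =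
            scanB1 a.1 a.2 t c g (r.map (fun x => (x.1, x.2, "red"))) by
          simp [scanB1, h2]]
      rw [show pyA1 a (x :: t) c g r = pyA1 a t c g r by simp [pyA1, h1]]
      exact ih c g r
    · by_cases h2 : x.1 > a.2
      · have hB : x.1 > a.2 ∧ x.2 > a.1 := ⟨h2, by omega⟩
        simp [scanB1, pyA1, hB, h1]
      · have hB : ¬ (x.1 > a.2 ∧ x.2 > a.1) := by omega
        have h3 : x.2 > a.1 := by omega
        rw [show scanB1 a.1 a.2 (x :: t) c g (r.map (fun x => (x.1, x.2, "red"))) =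
              scanB1 a.1 a.2 t (min x.2 a.2) (g ++ [(max x.1 c, min x.2 a.2)])
                ((if x.1 > c then r ++ [(c, x.1)] else r).map (fun x => (x.1, x.2, "red"))) by
            simp only [scanB1]
            rw [if_neg hB, if_pos h3]
            split_ifs <;> simp]
        rw [show pyA1 a (x :: t) c g r =
              pyA1 a t (min x.2 a.2) (g ++ [(max x.1 c, min x.2 a.2)])
                (if x.1 > c then r ++ [(c, x.1)] else r) by simp [pyA1, h1, h2]]
        exact ih _ _ _

theorem scanB2_eq (g : Int × Int) :
    ∀ (l : List (Int × Int)) (c : Int) (y : List (Int × Int)),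
      scanB2 g.1 g.2 l c (y.map (fun x => (x.1, x.2, "magenta"))) =
        ((pyA2 g l c y).1, (pyA2 g l c y).2.map (fun x => (x.1, x.2, "magenta"))) := by
  intro l
  induction l with
  | nil => intro c y; rfl
  | cons x t ih =>
    intro c y
    by_cases h1 : x.2 ≤ g.1
    · have hB : ¬ (x.1 > g.2 ∧ x.2 > g.1) := by omega
      have h2 : ¬ x.2 > g.1 := by omega
      rw [show scanB2 g.1 g.2 (x :: t) c (y.map (fun x => (x.1, x.2, "magenta"))) =
            scanB2 g.1 g.2 t c (y.map (fun x => (x.1, x.2, "magenta"))) by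
          simp [scanB2, h2]]
      rw [show pyA2 g (x :: t) c y = pyA2 g t c y by simp [pyA2, h1]]
      exact ih c y
    · by_cases h2 : x.1 > g.2
      · have hB : x.1 > g.2 ∧ x.2 > g.1 := ⟨h2, by omega⟩
        simp [scanB2, pyA2, hB, h1]
      · have hB : ¬ (x.1 > g.2 ∧ x.2 > g.1) := by omega
        have h3 : x.2 > g.1 := by omega
        rw [show scanB2 g.1 g.2 (x :: t) c (y.map (fun x => (x.1, x.2, "magenta"))) =
              scanB2 g.1 g.2 t x.2
                ((if x.1 > g.1 then y ++ [(c, min g.2 x.1)] else y).map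
                  (fun x => (x.1, x.2, "magenta"))) by
            simp only [scanB2]
            rw [if_neg hB, if_pos h3]
            split_ifs <;> simp]
        rw [show pyA2 g (x :: t) c y =
              pyA2 g t x.2 (if x.1 > g.1 then y ++ [(c, min g.2 x.1)] else y) by
            simp [pyA2, h1, h2]]
        exact ih _ _

-- phase-1 folds agree: the suffix pointer only ever hides covers that are dead
-- for every remaining annotation (annotation starts ascend).
theorem fold1_eq (gS : List (Int × Int)) :
    ∀ (aS dropped rest : List (Int × Int)) (green red : List (Int × Int)),
      gS = dropped ++ rest →
      (∀ d ∈ dropped, ∀ a ∈ aS, d.2 ≤ a.1) →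
      aS.Pairwise (fun x y => x.1 ≤ y.1) →
      (aS.foldl (fun (st : List (Int × Int) × List (Int × Int) × List (Int × Int × String)) a =>
          let rest := skipDead a.1 st.1
          let r := scanB1 a.1 a.2 rest a.1 st.2.1 st.2.2
          (rest, r.2.1, if r.1 < a.2 then r.2.2 ++ [(r.1, a.2, "red")] else r.2.2))
        (rest, green, red.map (fun x => (x.1, x.2, "red")))).2 =
      ((aS.foldl (fun (st : List (Int × Int) × List (Int × Int)) a =>
          let r := pyA1 a gS a.1 st.1 st.2
          (r.2.1, if r.1 < a.2 then r.2.2 ++ [(r.1, a.2)] else r.2.2)) (green, red)).1,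
       (aS.foldl (fun (st : List (Int × Int) × List (Int × Int)) a =>
          let r := pyA1 a gS a.1 st.1 st.2
          (r.2.1, if r.1 < a.2 then r.2.2 ++ [(r.1, a.2)] else r.2.2)) (green, red)).2.map
         (fun x => (x.1, x.2, "red"))) := by
  intro aS
  induction aS with
  | nil => intro dropped rest green red _ _ _; rfl
  | cons a t ih =>
    intro dropped rest green red hsplit hdead hpw
    obtain ⟨pre, hpre, hpreDead⟩ := skipDead_decomp a.1 rest
    have hscan : pyA1 a gS a.1 green red = pyA1 a (skipDead a.1 rest) a.1 green red := by
      calc pyA1 a gS a.1 green red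
          = pyA1 a (dropped ++ rest) a.1 green red := by rw [hsplit]
        _ = pyA1 a rest a.1 green red := pyA1_dead_prefix a dropped rest a.1 green red
              (fun d hd => hdead d hd a List.mem_cons_self)
        _ = pyA1 a (pre ++ skipDead a.1 rest) a.1 green red := by rw [← hpre]
        _ = pyA1 a (skipDead a.1 rest) a.1 green red :=
              pyA1_dead_prefix a pre (skipDead a.1 rest) a.1 green red hpreDead
    simp only [List.foldl_cons]
    rw [scanB1_eq a (skipDead a.1 rest) a.1 green red, ← hscan]
    rw [show (if (pyA1 a gS a.1 green red).1 < a.2 then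
          (pyA1 a gS a.1 green red).2.2.map (fun x => (x.1, x.2, "red")) ++
            [((pyA1 a gS a.1 green red).1, a.2, "red")]
        else (pyA1 a gS a.1 green red).2.2.map (fun x => (x.1, x.2, "red"))) =
        (if (pyA1 a gS a.1 green red).1 < a.2 then
          (pyA1 a gS a.1 green red).2.2 ++ [((pyA1 a gS a.1 green red).1, a.2)]
        else (pyA1 a gS a.1 green red).2.2).map (fun x => (x.1, x.2, "red")) by
      split_ifs <;> simp]
    refine ih (dropped ++ pre) (skipDead a.1 rest) _ _ ?_ ?_ (List.Pairwise.of_cons hpw)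
    · rw [hsplit, List.append_assoc]
      exact congrArg (dropped ++ ·) hpre
    · intro d hd a' ha'
      have haa' : a.1 ≤ a'.1 := List.rel_of_pairwise_cons hpw ha'
      rcases List.mem_append.mp hd with hd | hd
      · exact hdead d hd a' (List.mem_cons_of_mem a ha')
      · exact le_trans (hpreDead d hd) haa'

-- phase-2 folds agree (gold starts ascend; the cover list here is `green`).
theorem fold2_eq (green : List (Int × Int)) :
    ∀ (gS dropped rest : List (Int × Int)) (yellow : List (Int × Int)),
      green = dropped ++ rest →
      (∀ d ∈ dropped, ∀ g ∈ gS, d.2 ≤ g.1) →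
      gS.Pairwise (fun x y => x.1 ≤ y.1) →
      (gS.foldl (fun (st : List (Int × Int) × List (Int × Int × String)) g =>
          let rest := skipDead g.1 st.1
          let r := scanB2 g.1 g.2 rest g.1 st.2
          (rest, if r.1 < g.2 then r.2 ++ [(r.1, g.2, "magenta")] else r.2))
        (rest, yellow.map (fun x => (x.1, x.2, "magenta")))).2 =
      (gS.foldl (fun (st : List (Int × Int)) g =>
          let r := pyA2 g green g.1 st
          if r.1 < g.2 then r.2 ++ [(r.1, g.2)] else r.2) yellow).map
        (fun x => (x.1, x.2, "magenta")) := by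
  intro gS
  induction gS with
  | nil => intro dropped rest yellow _ _ _; rfl
  | cons g t ih =>
    intro dropped rest yellow hsplit hdead hpw
    obtain ⟨pre, hpre, hpreDead⟩ := skipDead_decomp g.1 rest
    have hscan : pyA2 g green g.1 yellow = pyA2 g (skipDead g.1 rest) g.1 yellow := by
      calc pyA2 g green g.1 yellow
          = pyA2 g (dropped ++ rest) g.1 yellow := by rw [hsplit]
        _ = pyA2 g rest g.1 yellow := pyA2_dead_prefix g dropped rest g.1 yellow
              (fun d hd => hdead d hd g List.mem_cons_self)
        _ = pyA2 g (pre ++ skipDead g.1 rest) g.1 yellow := by rw [← hpre]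
        _ = pyA2 g (skipDead g.1 rest) g.1 yellow :=
              pyA2_dead_prefix g pre (skipDead g.1 rest) g.1 yellow hpreDead
    simp only [List.foldl_cons]
    rw [scanB2_eq g (skipDead g.1 rest) g.1 yellow, ← hscan]
    rw [show (if (pyA2 g green g.1 yellow).1 < g.2 then
          (pyA2 g green g.1 yellow).2.map (fun x => (x.1, x.2, "magenta")) ++
            [((pyA2 g green g.1 yellow).1, g.2, "magenta")]
        else (pyA2 g green g.1 yellow).2.map (fun x => (x.1, x.2, "magenta"))) =
        (if (pyA2 g green g.1 yellow).1 < g.2 then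
          (pyA2 g green g.1 yellow).2 ++ [((pyA2 g green g.1 yellow).1, g.2)]
        else (pyA2 g green g.1 yellow).2).map (fun x => (x.1, x.2, "magenta")) by
      split_ifs <;> simp]
    refine ih (dropped ++ pre) (skipDead g.1 rest) _ ?_ ?_ (List.Pairwise.of_cons hpw)
    · rw [hsplit, List.append_assoc]
      exact congrArg (dropped ++ ·) hpre
    · intro d hd g' hg'
      have hgg' : g.1 ≤ g'.1 := List.rel_of_pairwise_cons hpw hg'
      rcases List.mem_append.mp hd with hd | hd
      · exact hdead d hd g' (List.mem_cons_of_mem g hg')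
      · exact le_trans (hpreDead d hd) hgg'

theorem colourSpans_py_eq (annotationSpans goldSpans : List (Int × Int)) :
    colourSpans_py annotationSpans goldSpans = colourSpans_py_alt annotationSpans goldSpans := by
  unfold colourSpans_py colourSpans_py_alt
  have h1 := fold1_eq (PySem.List.sorted2 goldSpans (·.1) (·.2))
    (PySem.List.sorted2 annotationSpans (·.1) (·.2)) []
    (PySem.List.sorted2 goldSpans (·.1) (·.2)) [] [] rfl (by simp)
    (sorted2_pairwise_fst annotationSpans)
  simp only [List.map_nil] at h1
  have h2 := fun green => fold2_eq green
    (PySem.List.sorted2 goldSpans (·.1) (·.2)) [] green [] rfl (by simp)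
    (sorted2_pairwise_fst goldSpans)
  simp only [List.map_nil] at h2
  simp only [h1, h2]

-- ===== VERDICT (by name: the statement is the Claim_ definition above) =====
theorem colourSpans_py_spec : Claim_equal_colourSpans_py := by
  intro annotationSpans goldSpans _
  exact colourSpans_py_eq annotationSpans goldSpans
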